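-- pv_equiv track=rewrite | github.com/edx/pa11ycrawler | pa11ycrawler/util.py | pa11y_counts
-- ===== SOURCE A (Python) =====
-- def pa11y_counts(results):
--     """
--     Given a list of pa11y results, return three integers:
--     number of errors, number of warnings, and number of notices.
--     """
--     num_error = 0
--     num_warning = 0
--     num_notice = 0
--     for result in results:
--         if result['type'] == 'error':
--             num_error += 1
--         elif result['type'] == 'warning':
--             num_warning += 1
--         elif result['type'] == 'notice':
--             num_notice += 1
--     return num_error, num_warning, num_notice
-- ===== SOURCE B (Python) =====
-- def pa11y_counts(results):
--     """
--     Given a list of pa11y results, return three integers: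
--     number of errors, number of warnings, and number of notices.
--     """
--     types = [result['type'] for result in results]
--     return types.count('error'), types.count('warning'), types.count('notice')
-- ===== Notes on version B (the rewrite author's own statement) =====
-- stated objective: simpler
-- what changed: Replaces the three-accumulator loop with an elif chain by extracting the list of 'type' fields once and returning three list.count lookups on it.
import Mathlib
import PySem

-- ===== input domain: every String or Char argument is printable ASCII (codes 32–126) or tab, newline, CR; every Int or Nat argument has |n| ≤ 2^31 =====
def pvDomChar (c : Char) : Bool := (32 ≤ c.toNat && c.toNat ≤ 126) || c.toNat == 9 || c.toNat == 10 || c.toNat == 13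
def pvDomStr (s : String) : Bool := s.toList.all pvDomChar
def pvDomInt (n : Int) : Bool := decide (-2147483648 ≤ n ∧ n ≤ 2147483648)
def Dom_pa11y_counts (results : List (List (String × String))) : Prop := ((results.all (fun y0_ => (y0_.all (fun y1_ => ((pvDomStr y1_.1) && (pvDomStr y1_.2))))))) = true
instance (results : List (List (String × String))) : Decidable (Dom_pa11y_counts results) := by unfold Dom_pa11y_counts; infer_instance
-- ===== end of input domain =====

-- B extracts the 'type' fields once and returns three list.count lookups, replacing A's
-- three accumulators and elif chain (objective: simpler).

-- ===== PORT A =====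
-- result['type'] (KeyError when absent is excluded by Pre_; getD is exact under Pre_)
def pvTypeOf (r : List (String × String)) : String := (PySem.Dict.mk r).getD "type" ""

def pa11y_counts (results : List (List (String × String))) : Int × Int × Int :=
  results.foldl
    (fun acc r =>
      if pvTypeOf r = "error" then (acc.1 + 1, acc.2.1, acc.2.2)
      else if pvTypeOf r = "warning" then (acc.1, acc.2.1 + 1, acc.2.2)
      else if pvTypeOf r = "notice" then (acc.1, acc.2.1, acc.2.2 + 1)
      else acc)
    (0, 0, 0)

-- ===== PORT B =====
def pa11y_counts_alt (results : List (List (String × String))) : Int × Int × Int :=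
  let types := results.map pvTypeOf
  ((PySem.List.count types "error" : Int),
   (PySem.List.count types "warning" : Int),
   (PySem.List.count types "notice" : Int))

-- ===== PRECONDITION & SPEC =====
-- Pre_: every result has a 'type' key; on others both A and B raise KeyError.
def Pre_pa11y_counts (results : List (List (String × String))) : Prop :=
  (results.all (fun r => r.any (fun p => p.1 == "type"))) = true
instance (results : List (List (String × String))) : Decidable (Pre_pa11y_counts results) := by unfold Pre_pa11y_counts; infer_instance
def pvWitness_pa11y_counts : (List (List (String × String))) :=
  [[("type", "error")], [("type", "notice"), ("code", "c1")]]

def Spec_pa11y_counts (results : List (List (String × String))) (out : Int × Int × Int) : Prop := out = pa11y_counts_alt results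
instance (results : List (List (String × String))) (out : Int × Int × Int) : Decidable (Spec_pa11y_counts results out) := by unfold Spec_pa11y_counts; infer_instance

-- ===== CLAIM (what is proved, stated in full; the proofs are below) =====
def Claim_equal_pa11y_counts : Prop := ∀ (results : List (List (String × String))), Dom_pa11y_counts results → Pre_pa11y_counts results → Spec_pa11y_counts results (pa11y_counts results)

-- ===== LEMMAS AND PROOFS =====
theorem pa11y_counts_fold (results : List (List (String × String))) (e w n : Int) :
    results.foldl
      (fun acc r =>
        if pvTypeOf r = "error" then (acc.1 + 1, acc.2.1, acc.2.2)
        else if pvTypeOf r = "warning" then (acc.1, acc.2.1 + 1, acc.2.2)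
        else if pvTypeOf r = "notice" then (acc.1, acc.2.1, acc.2.2 + 1)
        else acc)
      (e, w, n)
    = (e + ((results.map pvTypeOf).count "error" : Int),
       w + ((results.map pvTypeOf).count "warning" : Int),
       n + ((results.map pvTypeOf).count "notice" : Int)) := by
  induction results generalizing e w n with
  | nil => simp
  | cons r rs ih =>
    simp only [List.foldl_cons, List.map_cons, List.count_cons]
    split_ifs with h1 h2 h3 <;> simp_all [beq_iff_eq] <;> ring_nf

-- ===== VERDICT (by name: the statement is the Claim_ definition above) =====
theorem pa11y_counts_spec : Claim_equal_pa11y_counts := by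
  intro results _ _
  show _ = _
  simp [pa11y_counts, pa11y_counts_alt, pa11y_counts_fold, PySem.List.count_eq]
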